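-- pv_equiv track=rewrite | github.com/erikbr01/policy_doctor | policy_doctor/data/path_utils.py | get_eval_dir_for_seed
-- ===== SOURCE A (Python) =====
-- def get_eval_dir_for_seed(eval_dir: str, seed: str, reference_seed: str) -> str:
--     """Derive eval_dir path for a given seed from the reference eval_dir.
--
--     Assumes the path has a segment ending with _reference_seed (e.g. square_mh_0).
--     Replaces that segment so it ends with _seed (e.g. square_mh_1).
--
--     Args:
--         eval_dir: Path for the reference seed (e.g. .../square_mh_0/latest).
--         seed: Target seed string (e.g. "1").
--         reference_seed: Seed string that eval_dir is for (e.g. "0").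
--
--     Returns:
--         Path with the seed segment replaced for the target seed.
--     """
--     if seed == reference_seed:
--         return eval_dir
--     path = eval_dir.rstrip("/")
--     parts = path.split("/")
--     suffix = "_" + reference_seed
--     for i in range(len(parts) - 1, -1, -1):
--         if parts[i].endswith(suffix):
--             parts[i] = parts[i][: -len(suffix)] + "_" + seed
--             return "/".join(parts)
--     return eval_dir
-- ===== SOURCE B (Python) =====
-- def get_eval_dir_for_seed(eval_dir: str, seed: str, reference_seed: str) -> str:
--     """Splice the new seed directly into the path string: find the rightmost
--     occurrence of '_' + reference_seed that ends a segment (followed by '/' or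
--     the end) and replace it in place, instead of splitting into a list of
--     segments and rejoining."""
--     if seed == reference_seed:
--         return eval_dir
--     suffix = "_" + reference_seed
--     path = eval_dir.rstrip("/")
--     if "/" not in suffix:  # a suffix containing '/' can never lie inside a single segment
--         n = len(suffix)
--         for p in range(len(path) - n, -1, -1):
--             at_boundary = p + n == len(path) or path[p + n] == "/"
--             if at_boundary and path.startswith(suffix, p):
--                 return path[:p] + "_" + seed + path[p + n:]
--     return eval_dir
-- ===== Notes on version B (the rewrite author's own statement) =====
-- stated objective: alternative
-- what changed: Instead of splitting the path into a list of segments, mutating one and rejoining, B scans the rstripped string right-to-left for the rightmost occurrence of '_'+reference_seed that ends a segment (followed by '/' or the end) and splices '_'+seed directly into the string.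
import Mathlib
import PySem

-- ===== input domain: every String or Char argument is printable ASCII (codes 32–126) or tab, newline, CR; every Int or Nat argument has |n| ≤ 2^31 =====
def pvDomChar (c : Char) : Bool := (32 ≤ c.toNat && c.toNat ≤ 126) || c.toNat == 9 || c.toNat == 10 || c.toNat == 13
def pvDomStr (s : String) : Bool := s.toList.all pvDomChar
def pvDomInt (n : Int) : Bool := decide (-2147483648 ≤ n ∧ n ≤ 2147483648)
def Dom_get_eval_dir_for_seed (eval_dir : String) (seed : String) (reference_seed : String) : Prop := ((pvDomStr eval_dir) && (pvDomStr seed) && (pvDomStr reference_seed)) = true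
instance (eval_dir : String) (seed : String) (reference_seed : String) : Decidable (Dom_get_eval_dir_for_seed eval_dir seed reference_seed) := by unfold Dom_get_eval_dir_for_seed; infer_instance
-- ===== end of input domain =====

-- B replaces A's split-into-segments / mutate / rejoin by an in-place splice at the
-- rightmost boundary-checked occurrence of the suffix in the path string (objective: alternative).

-- ===== PORT A =====
-- eval_dir.rstrip("/"): drop trailing '/' characters (hand port, exact for the one-char strip set)
def pyRstripSlash (cs : List Char) : List Char := (cs.reverse.dropWhile (· == '/')).reverse

-- path.split("/"): Python str.split with the single-character separator "/" (hand port, exact)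
def pySplitSlash : List Char → List (List Char)
  | [] => [[]]
  | c :: rest =>
    if c = '/' then [] :: pySplitSlash rest
    else
      match pySplitSlash rest with
      | [] => [[c]]          -- unreachable: pySplitSlash never returns []
      | p :: ps => (c :: p) :: ps

-- "/".join(parts) (hand port, exact)
def pyJoinSlash : List (List Char) → List Char
  | [] => []
  | [p] => p
  | p :: q :: ps => p ++ '/' :: pyJoinSlash (q :: ps)

-- A's loop 'for i in range(len(parts)-1, -1, -1)': the argument is the number of
-- indices still to scan (i+1 ↦ current index i); early return becomes 'some'.
-- parts[i][:-len(suffix)] is p.take (p.length - suffix.length): exact since suffix ≠ "".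
def aLoop (parts : List (List Char)) (suffix repl : List Char) : Nat → Option (List Char)
  | 0 => none
  | i + 1 =>
    match parts[i]? with
    | some p =>
      if suffix.isSuffixOf p then
        some (pyJoinSlash (parts.set i (p.take (p.length - suffix.length) ++ repl)))
      else aLoop parts suffix repl i
    | none => none

def get_eval_dir_for_seed (eval_dir : String) (seed : String) (reference_seed : String) : String :=
  if seed == reference_seed then eval_dir
  else
    let path := pyRstripSlash eval_dir.toList
    let parts := pySplitSlash path
    let suffix := '_' :: reference_seed.toList
    match aLoop parts suffix ('_' :: seed.toList) parts.length with
    | some r => String.ofList r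
    | none => eval_dir

-- ===== PORT B =====
-- B's loop 'for p in range(len(path)-n, -1, -1)': argument is p+1 (fuel = len-n+1,
-- 0 when the suffix is longer than the path, matching Python's empty range).
-- condition = 'at_boundary and path.startswith(suffix, p)'.
def bScan (path suffix repl : List Char) : Nat → Option (List Char)
  | 0 => none
  | p + 1 =>
    if (decide (p + suffix.length = path.length) || (path[p + suffix.length]? == some '/'))
        && suffix.isPrefixOf (path.drop p) then
      some (path.take p ++ repl ++ path.drop (p + suffix.length))
    else bScan path suffix repl p

def get_eval_dir_for_seed_alt (eval_dir : String) (seed : String) (reference_seed : String) : String :=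
  if seed == reference_seed then eval_dir
  else
    let suffix := '_' :: reference_seed.toList
    let path := pyRstripSlash eval_dir.toList
    if '/' ∈ suffix then eval_dir
    else
      match bScan path suffix ('_' :: seed.toList) (path.length + 1 - suffix.length) with
      | some r => String.ofList r
      | none => eval_dir

-- ===== PRECONDITION & SPEC =====
def Spec_get_eval_dir_for_seed (eval_dir : String) (seed : String) (reference_seed : String) (out : String) : Prop := out = get_eval_dir_for_seed_alt eval_dir seed reference_seed
instance (eval_dir : String) (seed : String) (reference_seed : String) (out : String) : Decidable (Spec_get_eval_dir_for_seed eval_dir seed reference_seed out) := by unfold Spec_get_eval_dir_for_seed; infer_instance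

-- ===== CLAIM (what is proved, stated in full; the proofs are below) =====
def Claim_equal_get_eval_dir_for_seed : Prop := ∀ (eval_dir : String) (seed : String) (reference_seed : String), Dom_get_eval_dir_for_seed eval_dir seed reference_seed → Spec_get_eval_dir_for_seed eval_dir seed reference_seed (get_eval_dir_for_seed eval_dir seed reference_seed)

-- ===== LEMMAS AND PROOFS =====

theorem split_ne_nil (cs : List Char) : pySplitSlash cs ≠ [] := by
  match cs with
  | [] => simp [pySplitSlash]
  | c :: rest =>
    simp only [pySplitSlash]
    split
    · simp
    · split <;> simp

theorem noslash_mem_split (cs : List Char) : ∀ p ∈ pySplitSlash cs, '/' ∉ p := by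
  induction cs with
  | nil => simp [pySplitSlash]
  | cons c rest ih =>
    intro p hp
    by_cases hc : c = '/'
    · simp only [pySplitSlash, if_pos hc, List.mem_cons] at hp
      rcases hp with h | h
      · simp [h]
      · exact ih p h
    · simp only [pySplitSlash, if_neg hc] at hp
      rcases hsp : pySplitSlash rest with _ | ⟨q, qs⟩
      · exact absurd hsp (split_ne_nil rest)
      · rw [hsp] at hp
        rcases List.mem_cons.mp hp with h | h
        · subst h
          intro hmem
          rcases List.mem_cons.mp hmem with h | h
          · exact hc h.symm
          · exact ih q (by rw [hsp]; exact List.mem_cons_self) h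
        · exact ih p (by rw [hsp]; exact List.mem_cons_of_mem _ h)

theorem split_no_slash (cs : List Char) (h : '/' ∉ cs) : pySplitSlash cs = [cs] := by
  induction cs with
  | nil => rfl
  | cons c rest ih =>
    simp only [List.mem_cons, not_or] at h
    simp only [pySplitSlash, if_neg (Ne.symm h.1), ih h.2]

theorem split_append_last (front last : List Char) (h : '/' ∉ last) :
    pySplitSlash (front ++ '/' :: last) = pySplitSlash front ++ [last] := by
  induction front with
  | nil => simp [pySplitSlash, split_no_slash last h]
  | cons c front ih =>
    by_cases hc : c = '/'
    · simp [pySplitSlash, if_pos hc, ih]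
    · simp only [List.cons_append, pySplitSlash, if_neg hc, ih]
      rcases hsp : pySplitSlash front with _ | ⟨q, qs⟩
      · exact absurd hsp (split_ne_nil front)
      · simp

theorem join_cons_head (c : Char) (q : List Char) (qs : List (List Char)) :
    pyJoinSlash ((c :: q) :: qs) = c :: pyJoinSlash (q :: qs) := by
  cases qs <;> simp [pyJoinSlash]

theorem join_split (cs : List Char) : pyJoinSlash (pySplitSlash cs) = cs := by
  induction cs with
  | nil => rfl
  | cons c rest ih =>
    by_cases hc : c = '/'
    · rcases hsp : pySplitSlash rest with _ | ⟨q, qs⟩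
      · exact absurd hsp (split_ne_nil rest)
      · rw [hsp] at ih
        simp [pySplitSlash, hsp, pyJoinSlash, ih, hc]
    · rcases hsp : pySplitSlash rest with _ | ⟨q, qs⟩
      · exact absurd hsp (split_ne_nil rest)
      · rw [hsp] at ih
        simp only [pySplitSlash, if_neg hc, hsp, join_cons_head, ih]

theorem join_append_singleton (xs : List (List Char)) (y : List Char) (h : xs ≠ []) :
    pyJoinSlash (xs ++ [y]) = pyJoinSlash xs ++ '/' :: y := by
  induction xs with
  | nil => exact absurd rfl h
  | cons x xs ih =>
    cases xs with
    | nil => simp [pyJoinSlash]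
    | cons z zs =>
      have h2 := ih (by simp)
      simp only [List.cons_append, pyJoinSlash] at h2 ⊢
      simp [h2]

theorem aLoop_none (parts : List (List Char)) (suffix repl : List Char) (i : Nat)
    (h : ∀ p ∈ parts, ¬ suffix.isSuffixOf p) :
    aLoop parts suffix repl i = none := by
  induction i with
  | zero => rfl
  | succ i ih =>
    rcases hget : parts[i]? with _ | p
    · simp [aLoop, hget]
    · simp only [aLoop, hget]
      rw [if_neg (h p (List.mem_of_getElem? hget))]
      exact ih

theorem aLoop_append (ps : List (List Char)) (l suffix repl : List Char) (i : Nat)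
    (hi : i ≤ ps.length) :
    aLoop (ps ++ [l]) suffix repl i = (aLoop ps suffix repl i).map (· ++ '/' :: l) := by
  induction i with
  | zero => rfl
  | succ i ih =>
    have hilt : i < ps.length := hi
    rcases hget : ps[i]? with _ | p
    · simp at hget; omega
    · simp only [aLoop, List.getElem?_append_left hilt, hget]
      split
      · have hset : (ps ++ [l]).set i (p.take (p.length - suffix.length) ++ repl)
            = ps.set i (p.take (p.length - suffix.length) ++ repl) ++ [l] := by
          rw [List.set_append]; simp [hilt]
        rw [hset, join_append_singleton _ _ (List.ne_nil_of_length_pos (by simp; omega))]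
        rfl
      · exact ih (Nat.le_of_lt hilt)

theorem bScan_skip (path suffix repl : List Char) (f g : Nat) (hg : g ≤ f)
    (h : ∀ p, g ≤ p → p < f →
      ¬ (((p + suffix.length = path.length) ∨ path[p + suffix.length]? = some '/')
          ∧ suffix <+: path.drop p)) :
    bScan path suffix repl f = bScan path suffix repl g := by
  induction f with
  | zero => rw [Nat.le_zero.mp hg]
  | succ f ih =>
    rcases Nat.eq_or_lt_of_le hg with he | hlt
    · rw [he]
    · have hgf : g ≤ f := by omega
      have hcond : ¬ (((f + suffix.length = path.length) ∨ path[f + suffix.length]? = some '/')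
          ∧ suffix <+: path.drop f) := h f hgf (by omega)
      simp only [bScan]
      rw [if_neg]
      · exact ih hgf (fun p hp1 hp2 => h p hp1 (by omega))
      · intro hb
        simp only [Bool.and_eq_true, Bool.or_eq_true, decide_eq_true_eq, beq_iff_eq,
          List.isPrefixOf_iff_prefix] at hb
        exact hcond ⟨hb.1, hb.2⟩

theorem prefix_getElem {l t : List Char} (h : l <+: t) (i : Nat) (hi : i < l.length) :
    t[i]? = some l[i] := by
  rcases h with ⟨r, rfl⟩
  rw [List.getElem?_append_left (by omega), List.getElem?_eq_getElem hi]

theorem bScan_append (front last suffix repl : List Char) (f : Nat)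
    (hfn : f ≤ front.length + 1 - suffix.length) :
    bScan (front ++ '/' :: last) suffix repl f
      = (bScan front suffix repl f).map (· ++ '/' :: last) := by
  induction f with
  | zero => rfl
  | succ f ih =>
    have hfn' : f + suffix.length ≤ front.length := by omega
    have hfle : f ≤ front.length := by omega
    have hpre : suffix.isPrefixOf ((front ++ '/' :: last).drop f)
        = suffix.isPrefixOf (front.drop f) := by
      rw [List.drop_append_of_le_length hfle]
      by_cases hp : suffix <+: front.drop f
      · rw [List.isPrefixOf_iff_prefix.mpr (hp.trans (List.prefix_append _ _)),
          List.isPrefixOf_iff_prefix.mpr hp]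
      · have hnp : ¬ suffix <+: front.drop f ++ '/' :: last := by
          intro hc
          apply hp
          have htake := List.prefix_iff_eq_take.mp hc
          rw [List.take_append_of_le_length (by simp; omega)] at htake
          exact List.prefix_iff_eq_take.mpr htake
        rw [Bool.eq_false_iff.mpr (fun hc => hnp (List.isPrefixOf_iff_prefix.mp hc)),
          Bool.eq_false_iff.mpr (fun hc => hp (List.isPrefixOf_iff_prefix.mp hc))]
    have hbound : (decide (f + suffix.length = (front ++ '/' :: last).length)
          || ((front ++ '/' :: last)[f + suffix.length]? == some '/'))
        = (decide (f + suffix.length = front.length) || (front[f + suffix.length]? == some '/')) := by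
      by_cases hm : f + suffix.length = front.length
      · have hg : (front ++ '/' :: last)[f + suffix.length]? = some '/' := by
          rw [hm]
          rw [show front.length = front.length + 0 from rfl, List.getElem?_append_right (by omega)]
          simp
        have hne : f + suffix.length ≠ (front ++ '/' :: last).length := by simp; omega
        simp [hm]
      · have hlt : f + suffix.length < front.length := by omega
        rw [List.getElem?_append_left hlt]
        have hne2 : f + suffix.length ≠ (front ++ '/' :: last).length := by simp; omega
        rw [decide_eq_false hne2, decide_eq_false hm]
    simp only [bScan, hbound, hpre]
    split
    · have hdrop : (front ++ '/' :: last).drop (f + suffix.length)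
          = front.drop (f + suffix.length) ++ '/' :: last :=
        List.drop_append_of_le_length hfn'
      have htake : (front ++ '/' :: last).take f = front.take f :=
        List.take_append_of_le_length hfle
      simp [hdrop, htake]
    · exact ih (by omega)

theorem prefix_drop_eq (path suffix : List Char) (p : Nat)
    (hp : p + suffix.length = path.length) (hpre : suffix <+: path.drop p) :
    suffix = path.drop p := by
  apply List.IsPrefix.eq_of_length hpre
  simp
  omega

theorem bScan_none_of_noslash (path suffix repl : List Char) (h : '/' ∉ path)
    (hnosuf : ¬ suffix <:+ path) (f : Nat) :
    bScan path suffix repl f = none := by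
  rw [bScan_skip path suffix repl f 0 (Nat.zero_le _)]
  · rfl
  · rintro p - - ⟨hb, hpre⟩
    rcases hb with hb | hb
    · exact hnosuf (prefix_drop_eq path suffix p hb hpre ▸ List.drop_suffix p path)
    · exact h (List.mem_of_getElem? hb)

theorem main_noslash (suffix repl : List Char) (path : List Char)
    (h : '/' ∉ path) :
    aLoop (pySplitSlash path) suffix repl (pySplitSlash path).length
      = bScan path suffix repl (path.length + 1 - suffix.length) := by
  rw [split_no_slash path h]
  by_cases hsuf : suffix.isSuffixOf path
  · have hsuf' : suffix <:+ path := List.isSuffixOf_iff_suffix.mp hsuf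
    have hnle : suffix.length ≤ path.length := hsuf'.length_le
    have hdrop : path.drop (path.length - suffix.length) = suffix :=
      (List.suffix_iff_eq_drop.mp hsuf').symm
    have hfuel : path.length + 1 - suffix.length = (path.length - suffix.length) + 1 := by omega
    rw [hfuel]
    simp only [aLoop, bScan, List.length_cons, List.length_nil, List.getElem?_cons_zero]
    rw [if_pos hsuf, if_pos]
    · have hde : path.length - suffix.length + suffix.length = path.length := by omega
      simp [hde, pyJoinSlash]
    · simp [hdrop, List.isPrefixOf_iff_prefix]
      omega
  · rw [aLoop_none _ _ _ _ (by intro p hp; simp at hp; rw [hp]; exact hsuf)]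
    rw [bScan_none_of_noslash path suffix repl h
      (fun hc => hsuf (List.isSuffixOf_iff_suffix.mpr hc)) _]

theorem last_slash_decomp (cs : List Char) :
    '/' ∉ cs ∨ ∃ f l, cs = f ++ '/' :: l ∧ '/' ∉ l := by
  induction cs with
  | nil => left; simp
  | cons c rest ih =>
    rcases ih with h | ⟨f, l, rfl, hl⟩
    · by_cases hc : c = '/'
      · right; exact ⟨[], rest, by simp [hc], h⟩
      · left; simp [Ne.symm hc, h]
    · right; exact ⟨c :: f, l, rfl, hl⟩

theorem skip_cond (front l suffix : List Char) (hs : '/' ∉ suffix) (hl : '/' ∉ l)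
    (hnosuf : ¬ suffix <:+ l) (hn : suffix ≠ []) (p : Nat)
    (hp1 : front.length + 1 - suffix.length ≤ p) :
    ¬ (((p + suffix.length = (front ++ '/' :: l).length)
          ∨ (front ++ '/' :: l)[p + suffix.length]? = some '/')
        ∧ suffix <+: (front ++ '/' :: l).drop p) := by
  rintro ⟨hb, hpre⟩
  have hn1 : 1 ≤ suffix.length := List.length_pos_iff.mpr hn
  by_cases hpm : p ≤ front.length
  · -- the match would have to cover the '/' at index front.length
    have hmp : front.length - p < suffix.length := by omega
    have hdg := prefix_getElem hpre (front.length - p) hmp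
    rw [List.getElem?_drop] at hdg
    have hpe : p + (front.length - p) = front.length := by omega
    rw [hpe] at hdg
    have hsl : (front ++ '/' :: l)[front.length]? = some '/' := by
      rw [show front.length = front.length + 0 from rfl, List.getElem?_append_right (by omega)]
      simp
    rw [hsl] at hdg
    exact hs (Option.some.inj hdg ▸ List.getElem_mem hmp)
  · replace hpm : front.length < p := by omega
    rcases hb with hb | hb
    · -- match at the very end: suffix would be a suffix of l
      have hdl : (front ++ '/' :: l).drop p = l.drop (p - (front.length + 1)) := by
        have h1 : (front ++ '/' :: l).drop p
            = ((front ++ ['/']) ++ l).drop ((front ++ ['/']).length + (p - (front.length + 1))) := by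
          rw [show (front ++ ['/']).length + (p - (front.length + 1)) = p by simp; omega]
          simp
        rw [h1, List.drop_length_add_append]
      have heq := prefix_drop_eq (front ++ '/' :: l) suffix p hb hpre
      rw [hdl] at heq
      exact hnosuf (heq ▸ List.drop_suffix _ l)
    · -- a '/' strictly inside l
      have hge : (front ++ ['/']).length ≤ p + suffix.length := by simp; omega
      rw [show front ++ '/' :: l = (front ++ ['/']) ++ l by simp,
        List.getElem?_append_right hge] at hb
      exact hl (List.mem_of_getElem? hb)

theorem main_aux (suffix repl : List Char) (hs : '/' ∉ suffix) (hn : suffix ≠ []) :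
    ∀ N path, path.length ≤ N →
    aLoop (pySplitSlash path) suffix repl (pySplitSlash path).length
      = bScan path suffix repl (path.length + 1 - suffix.length) := by
  intro N
  induction N with
  | zero =>
    intro path hlen
    have : path = [] := List.length_eq_zero_iff.mp (Nat.le_zero.mp hlen)
    subst this
    exact main_noslash suffix repl [] (by simp)
  | succ N ih =>
    intro path hlen
    rcases last_slash_decomp path with h | ⟨front, l, rfl, hl⟩
    · exact main_noslash suffix repl path h
    · have hlenf : front.length ≤ N := by simp at hlen; omega
      have hn1 : 1 ≤ suffix.length := List.length_pos_iff.mpr hn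
      rw [split_append_last front l hl]
      have hPne := split_ne_nil front
      simp only [List.length_append, List.length_cons, List.length_nil]
      simp only [aLoop, List.getElem?_concat_length]
      by_cases hsuf : suffix.isSuffixOf l
      · rw [if_pos hsuf]
        have hsuf' : suffix <:+ l := List.isSuffixOf_iff_suffix.mp hsuf
        have hnle : suffix.length ≤ l.length := hsuf'.length_le
        have hdropl : l.drop (l.length - suffix.length) = suffix :=
          (List.suffix_iff_eq_drop.mp hsuf').symm
        -- the set at the last index
        have hset : ((pySplitSlash front) ++ [l]).set (pySplitSlash front).length
              (l.take (l.length - suffix.length) ++ repl)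
            = (pySplitSlash front) ++ [l.take (l.length - suffix.length) ++ repl] := by
          rw [List.set_append_right _ _ (le_refl _)]
          simp
        rw [hset, join_append_singleton _ _ hPne, join_split]
        -- B side: fuel = p* + 1 with p* = front.length + 1 + (l.length - suffix.length)
        have hfuel : front.length + (l.length + 1) + 1 - suffix.length
            = (front.length + 1 + (l.length - suffix.length)) + 1 := by omega
        rw [hfuel]
        simp only [bScan]
        rw [if_pos]
        · have hdrop2 : (front ++ '/' :: l).drop
              (front.length + 1 + (l.length - suffix.length) + suffix.length) = [] := by
            apply List.drop_eq_nil_of_le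
            simp
            omega
          have htake2 : (front ++ '/' :: l).take (front.length + 1 + (l.length - suffix.length))
              = front ++ '/' :: l.take (l.length - suffix.length) := by
            rw [show front.length + 1 + (l.length - suffix.length)
                = front.length + (1 + (l.length - suffix.length)) by omega]
            rw [List.take_length_add_append,
              show 1 + (l.length - suffix.length) = (l.length - suffix.length) + 1 by omega]
            simp
          rw [hdrop2, htake2]
          simp
        · have hdrop3 : (front ++ '/' :: l).drop (front.length + 1 + (l.length - suffix.length))
              = l.drop (l.length - suffix.length) := by
            rw [show front.length + 1 + (l.length - suffix.length)
                = (front ++ ['/']).length + (l.length - suffix.length) by simp]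
            rw [show front ++ '/' :: l = (front ++ ['/']) ++ l by simp]
            rw [List.drop_length_add_append]
          simp [hdrop3, hdropl, List.isPrefixOf_iff_prefix]
          omega
      · rw [if_neg hsuf]
        rw [aLoop_append _ _ _ _ _ (le_refl _), ih front hlenf]
        have hskip : bScan (front ++ '/' :: l) suffix repl
              ((front ++ '/' :: l).length + 1 - suffix.length)
            = bScan (front ++ '/' :: l) suffix repl (front.length + 1 - suffix.length) := by
          apply bScan_skip
          · simp; omega
          · intro p hp1 _
            exact skip_cond front l suffix hs hl
              (fun hc => hsuf (List.isSuffixOf_iff_suffix.mpr hc)) hn p hp1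
        have hlen2 : (front ++ '/' :: l).length + 1 - suffix.length
            = front.length + (l.length + 1) + 1 - suffix.length := by simp
        rw [← hlen2, hskip]
        exact (bScan_append front l suffix repl (front.length + 1 - suffix.length)
          (le_refl _)).symm

theorem main_lemma (suffix repl : List Char) (hs : '/' ∉ suffix) (hn : suffix ≠ [])
    (path : List Char) :
    aLoop (pySplitSlash path) suffix repl (pySplitSlash path).length
      = bScan path suffix repl (path.length + 1 - suffix.length) := by
  exact main_aux suffix repl hs hn path.length path (le_refl _)

-- ===== VERDICT (by name: the statement is the Claim_ definition above) =====
theorem get_eval_dir_for_seed_spec : Claim_equal_get_eval_dir_for_seed := by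
  intro e s r _
  simp only [Spec_get_eval_dir_for_seed, get_eval_dir_for_seed, get_eval_dir_for_seed_alt]
  by_cases hsr : (s == r) = true
  · simp [hsr]
  · simp only [hsr]
    by_cases hslash : '/' ∈ ('_' :: r.toList)
    · rw [if_pos hslash, aLoop_none]
      intro p hp hsuf
      exact (noslash_mem_split _ p hp)
        ((List.isSuffixOf_iff_suffix.mp hsuf).mem hslash)
    · rw [if_neg hslash,
        main_lemma ('_' :: r.toList) ('_' :: s.toList) hslash (by simp)]
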